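-- pv_equiv track=rewrite | github.com/Ramonlobo633/Scheduling-problem-AI | Problema_IA/constraints.py | conflitsr3
-- ===== SOURCE A (Python) =====
-- def conflitsr3(allocation, nurses):
--     conflits = 0
--     count = 0
--     nrest = 0
--     for i in range(0, 21*nurses, 21):
--         for j in range(i, (i+21)):
--             if allocation[j] == '1':
--                 count += 1
--
--                 if nrest > 3:
--                     conflits += 1
--
--                 if nrest <= 3:
--                     nrest += 1
--             else:
--                 nrest = 0
--
--
--     return conflits
-- ===== SOURCE B (Python) =====
-- def conflitsr3(allocation, nurses):
--     # Group the schedule into maximal runs of consecutive '1' shifts;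
--     # a run of length L contributes max(L - 4, 0) conflicts.
--     seg = [allocation[k] for k in range(21 * nurses)]
--     seg.reverse()                      # pop() from the end == consume the front
--     total = 0
--     while seg:
--         c = seg.pop()
--         if c == '1':
--             run = 1
--             while seg and seg[-1] == '1':
--                 seg.pop()
--                 run += 1
--             total += max(run - 4, 0)
--     return total
-- ===== Notes on version B (the rewrite author's own statement) =====
-- stated objective: alternative
-- what changed: B replaces A's per-character scan with a capped rest-counter state by grouping the allocation into maximal runs of consecutive '1' shifts and adding the closed form max(run_length - 4, 0) per run.
import Mathlib
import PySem

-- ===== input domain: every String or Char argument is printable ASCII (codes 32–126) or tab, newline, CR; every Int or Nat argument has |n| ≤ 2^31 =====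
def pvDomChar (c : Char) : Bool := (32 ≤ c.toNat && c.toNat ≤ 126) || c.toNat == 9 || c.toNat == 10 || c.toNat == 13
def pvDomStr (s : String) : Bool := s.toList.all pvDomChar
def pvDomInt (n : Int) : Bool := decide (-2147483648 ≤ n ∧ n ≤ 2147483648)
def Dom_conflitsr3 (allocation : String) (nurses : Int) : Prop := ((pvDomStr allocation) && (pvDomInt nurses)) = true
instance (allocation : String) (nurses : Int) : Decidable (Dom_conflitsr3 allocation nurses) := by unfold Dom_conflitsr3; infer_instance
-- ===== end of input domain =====

-- B groups the allocation into maximal runs of consecutive '1' shifts and adds the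
-- closed form max(run-4, 0) per run, instead of A's per-character capped rest counter
-- (objective: alternative decomposition, same cost).

-- ===== PORT A =====
-- literal port of A's nested for-loops over the (conflits, count, nrest) state;
-- allocation[j] is pyGetD (the default is never read: Pre_ excludes the IndexError inputs)
def conflitsr3 (allocation : String) (nurses : Int) : Int :=
  let chars := allocation.toList
  let st :=
    (PySem.List.pyRange 0 (21 * nurses) 21).foldl
      (fun (st : Int × Int × Int) i =>
        (PySem.List.pyRange i (i + 21) 1).foldl
          (fun (st : Int × Int × Int) j =>
            let conflits := st.1
            let count := st.2.1
            let nrest := st.2.2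
            if PySem.List.pyGetD chars j ' ' = '1' then
              let count := count + 1
              let conflits := if nrest > 3 then conflits + 1 else conflits
              let nrest := if nrest ≤ 3 then nrest + 1 else nrest
              (conflits, count, nrest)
            else
              (conflits, count, 0))
          st)
      (0, 0, 0)
  st.1

-- ===== PORT B =====
-- Source B consumes the segment front-to-back (reverse + pop() is Python's O(1) device for
-- eating the front); the inner while that eats a run of '1' is takeWhile/dropWhile
def pvRunTotal : List Char → Int
  | [] => 0
  | c :: t =>
    if c = '1' then
      let run := 1 + (t.takeWhile (fun x => x = '1')).length
      max ((run : Int) - 4) 0 + pvRunTotal (t.dropWhile (fun x => x = '1'))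
    else
      pvRunTotal t
termination_by l => l.length
decreasing_by
  · have := List.length_dropWhile_le (fun x => x = '1') t
    simp only [List.length_cons]; omega
  · simp only [List.length_cons]; omega

def conflitsr3_alt (allocation : String) (nurses : Int) : Int :=
  let chars := allocation.toList
  let seg := (PySem.List.pyRange 0 (21 * nurses) 1).map
    (fun k => PySem.List.pyGetD chars k ' ')
  pvRunTotal seg

-- ===== PRECONDITION & SPEC =====
-- Pre_ excludes exactly the inputs where the Python A raises IndexError
-- (0 < nurses and the string shorter than 21*nurses); B raises there too.
def Pre_conflitsr3 (allocation : String) (nurses : Int) : Prop :=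
  nurses ≤ 0 ∨ 21 * nurses ≤ (allocation.toList.length : Int)
instance (allocation : String) (nurses : Int) : Decidable (Pre_conflitsr3 allocation nurses) := by
  unfold Pre_conflitsr3; infer_instance

def pvWitness_conflitsr3 : String × Int := ("111110111111000111111", 1)

def Spec_conflitsr3 (allocation : String) (nurses : Int) (out : Int) : Prop := out = conflitsr3_alt allocation nurses
instance (allocation : String) (nurses : Int) (out : Int) : Decidable (Spec_conflitsr3 allocation nurses out) := by unfold Spec_conflitsr3; infer_instance

-- ===== CLAIM (what is proved, stated in full; the proofs are below) =====
def Claim_equal_conflitsr3 : Prop := ∀ (allocation : String) (nurses : Int), Dom_conflitsr3 allocation nurses → Pre_conflitsr3 allocation nurses → Spec_conflitsr3 allocation nurses (conflitsr3 allocation nurses)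

-- ===== LEMMAS AND PROOFS =====

-- A's per-character state update, extracted from the port's inner lambda
def pvStep (st : Int × Int × Int) (c : Char) : Int × Int × Int :=
  if c = '1' then
    ((if st.2.2 > 3 then st.1 + 1 else st.1), st.2.1 + 1,
      (if st.2.2 ≤ 3 then st.2.2 + 1 else st.2.2))
  else
    (st.1, st.2.1, 0)

-- conflicts produced by A's scan of a char list starting from rest-state r
def pvW : Int → List Char → Int
  | _, [] => 0
  | r, c :: t =>
    if c = '1' then (if r > 3 then 1 else 0) + pvW (if r ≤ 3 then r + 1 else r) t
    else pvW 0 t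

lemma pv_range21_cons (a : Int) (m : Nat) :
    PySem.List.pyRange a (a + 21 * ((m : Int) + 1)) 21
      = a :: PySem.List.pyRange (a + 21) (a + 21 * ((m : Int) + 1)) 21 := by
  rw [PySem.List.pyRange_of_pos _ _ (by norm_num : (0:Int) < 21),
      PySem.List.pyRange_of_pos _ _ (by norm_num : (0:Int) < 21)]
  have h1 : (if a < a + 21 * ((m:Int) + 1)
      then ((a + 21 * ((m:Int) + 1) - a + 21 - 1) / 21).toNat else 0) = m + 1 := by
    rw [if_pos (by omega)]; omega
  have h2 : (if a + 21 < a + 21 * ((m:Int) + 1)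
      then ((a + 21 * ((m:Int) + 1) - (a + 21) + 21 - 1) / 21).toNat else 0) = m := by
    split_ifs with hm <;> omega
  rw [h1, h2, List.range_succ_eq_map, List.map_cons, List.map_map]
  refine congrArg₂ _ (by simp) ?_
  exact List.map_congr_left (fun k _ => by push_cast [Function.comp]; ring)

lemma pv_flatten {St : Type} (g : St → Int → St) (m : Nat) :
    ∀ (a : Int) (init : St),
      (PySem.List.pyRange a (a + 21 * (m : Int)) 21).foldl
        (fun st i => (PySem.List.pyRange i (i + 21) 1).foldl g st) init
      = (PySem.List.pyRange a (a + 21 * (m : Int)) 1).foldl g init := by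
  induction m with
  | zero =>
    intro a init
    simp [PySem.List.pyRange_one_eq_nil, PySem.List.pyRange_of_pos _ _ (by norm_num : (0:Int) < 21)]
  | succ m ih =>
    intro a init
    have hc : ((m + 1 : Nat) : Int) = (m : Int) + 1 := by push_cast; ring
    rw [hc, pv_range21_cons a m, List.foldl_cons]
    have harr : a + 21 * ((m : Int) + 1) = (a + 21) + 21 * (m : Int) := by ring
    rw [harr, ih (a + 21)]
    rw [PySem.List.pyRange_one_append a (a + 21) ((a + 21) + 21 * (m : Int)) (by omega) (by omega),
        List.foldl_append]

lemma pv_foldl_map_step (f : Int → Char) (l : List Int) (st : Int × Int × Int) :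
    l.foldl (fun st j => pvStep st (f j)) st = (l.map f).foldl pvStep st := by
  induction l generalizing st with
  | nil => rfl
  | cons x xs ih => simp only [List.foldl_cons, List.map_cons]; exact ih _

lemma pv_fold_fst (l : List Char) :
    ∀ (conf count r : Int), (l.foldl pvStep (conf, count, r)).1 = conf + pvW r l := by
  induction l with
  | nil => intro conf count r; simp [pvW]
  | cons c t ih =>
    intro conf count r
    simp only [List.foldl_cons, pvStep, pvW]
    by_cases hc : c = '1'
    · simp only [hc, if_true]
      split_ifs <;> rw [ih] <;> ring
    · simp only [hc, if_false]
      rw [ih]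

lemma pv_run_drop (l : List Char) :
    pvRunTotal l = max (((l.takeWhile (fun x => x = '1')).length : Int) - 4) 0
      + pvRunTotal (l.dropWhile (fun x => x = '1')) := by
  cases l with
  | nil => simp [pvRunTotal]
  | cons c t =>
    by_cases hc : c = '1'
    · simp only [pvRunTotal, hc, if_true, List.takeWhile_cons, List.dropWhile_cons,
        decide_true, List.length_cons]
      push_cast; ring_nf
    · simp [pvRunTotal, hc]

lemma pv_W_run (l : List Char) :
    ∀ (r : Int), 0 ≤ r → r ≤ 4 →
      pvW r l = pvRunTotal l
        - max (((l.takeWhile (fun x => x = '1')).length : Int) - 4) 0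
        + max (((l.takeWhile (fun x => x = '1')).length : Int) - 4 + r) 0 := by
  induction l with
  | nil => intro r h0 h4; simp [pvW, pvRunTotal]; omega
  | cons c t ih =>
    intro r h0 h4
    by_cases hc : c = '1'
    · have hr'0 : (0 : Int) ≤ (if r ≤ 3 then r + 1 else r) := by split_ifs <;> omega
      have hr'4 : (if r ≤ 3 then r + 1 else r) ≤ 4 := by split_ifs <;> omega
      have iht := ih (if r ≤ 3 then r + 1 else r) hr'0 hr'4
      rw [pv_run_drop t] at iht
      simp only [pvW, pvRunTotal, hc, if_true, List.takeWhile_cons,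
        decide_true, List.length_cons] at iht ⊢
      rw [iht]
      have hLt0 : (0:Int) ≤ ((t.takeWhile (fun x => decide (x = '1'))).length : Int) := by positivity
      push_cast
      split_ifs <;> omega
    · have iht := ih 0 le_rfl (by norm_num)
      simp only [pvW, pvRunTotal, hc, List.takeWhile_cons, decide_false,
        Bool.false_eq_true, if_false, List.length_nil] at iht ⊢
      omega

lemma pv_main (l : List Char) : (l.foldl pvStep ((0:Int), (0:Int), (0:Int))).1 = pvRunTotal l := by
  rw [pv_fold_fst l 0 0 0, pv_W_run l 0 le_rfl (by norm_num)]
  omega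

-- ===== VERDICT (by name: the statement is the Claim_ definition above) =====
theorem conflitsr3_spec : Claim_equal_conflitsr3 := by
  intro allocation nurses _ _
  unfold Spec_conflitsr3 conflitsr3 conflitsr3_alt
  simp only []
  have hbody : (fun (st : Int × Int × Int) (j : Int) =>
      let conflits := st.1
      let count := st.2.1
      let nrest := st.2.2
      if PySem.List.pyGetD allocation.toList j ' ' = '1' then
        let count := count + 1
        let conflits := if nrest > 3 then conflits + 1 else conflits
        let nrest := if nrest ≤ 3 then nrest + 1 else nrest
        (conflits, count, nrest)
      else
        (conflits, count, 0))
      = (fun st j => pvStep st (PySem.List.pyGetD allocation.toList j ' ')) := rfl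
  rw [hbody]
  by_cases hn : 0 < nurses
  · have hm : nurses = ((nurses.toNat : Int)) := by omega
    have h0 : 21 * ((nurses.toNat : Int)) = 0 + 21 * ((nurses.toNat : Int)) := by ring
    rw [hm, h0, pv_flatten _ nurses.toNat 0 ((0:Int),(0:Int),(0:Int)),
        pv_foldl_map_step, pv_main]
  · have h21 : PySem.List.pyRange 0 (21 * nurses) 21 = [] := by
      rw [PySem.List.pyRange_of_pos _ _ (by norm_num : (0:Int) < 21), if_neg (by omega)]
      simp
    have h1 : PySem.List.pyRange 0 (21 * nurses) 1 = [] :=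
      PySem.List.pyRange_one_eq_nil (by omega)
    rw [h21, h1]
    simp [pvRunTotal]
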